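-- pv_equiv track=rewrite | github.com/aws-samples/sample-agentic-attack-tree-generator | src/threatforest/modules/workflow/attack_tree_generator/tree_validator.py | _count_node_types
-- ===== SOURCE A (Python) =====
-- from typing import Dict, Any
--
-- def _count_node_types(mermaid_code: str) -> Dict[str, int]:
--     """Count nodes by type in Mermaid code
--
--     Args:
--         mermaid_code: Mermaid diagram code
--
--     Returns:
--         Dict with counts for each node type
--     """
--     return {
--         'attack': len([line for line in mermaid_code.split('\n')
--                       if 'class ' in line and 'attack' in line]),
--         'goal': len([line for line in mermaid_code.split('\n')
--                     if 'class ' in line and 'goal' in line]),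
--         'fact': len([line for line in mermaid_code.split('\n')
--                     if 'class ' in line and 'fact' in line]),
--         'mitigation': len([line for line in mermaid_code.split('\n')
--                          if 'class ' in line and 'mitigation' in line])
--     }
-- ===== SOURCE B (Python) =====
-- def _count_node_types(mermaid_code: str):
--     attack = goal = fact = mitigation = 0
--     for line in mermaid_code.split('\n'):
--         if 'class ' not in line:
--             continue
--         if 'attack' in line:
--             attack += 1
--         if 'goal' in line:
--             goal += 1
--         if 'fact' in line:
--             fact += 1
--         if 'mitigation' in line:
--             mitigation += 1
--     return {'attack': attack, 'goal': goal, 'fact': fact, 'mitigation': mitigation}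
-- ===== Notes on version B (the rewrite author's own statement) =====
-- stated objective: simpler
-- what changed: Splits the string once and counts all four node types in a single pass with independent if-tests, instead of four separate split-and-filter scans.
import Mathlib
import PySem

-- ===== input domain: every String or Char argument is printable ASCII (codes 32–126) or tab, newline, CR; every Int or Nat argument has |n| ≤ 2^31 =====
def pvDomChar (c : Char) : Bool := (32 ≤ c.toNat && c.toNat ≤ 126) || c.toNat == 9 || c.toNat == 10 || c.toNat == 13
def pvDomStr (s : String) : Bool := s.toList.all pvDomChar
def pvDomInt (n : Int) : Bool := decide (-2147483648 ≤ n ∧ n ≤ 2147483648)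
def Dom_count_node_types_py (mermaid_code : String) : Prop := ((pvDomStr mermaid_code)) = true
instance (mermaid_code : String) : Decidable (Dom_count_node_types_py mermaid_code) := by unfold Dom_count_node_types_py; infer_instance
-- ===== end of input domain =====

-- B counts all four node types in one pass over the lines (independent if-tests) instead of A's four separate split-and-filter scans; simpler.

-- ===== PORT A =====
-- split('\n') with a nonempty separator is PySem.Chars.splitOn on the code points (exact)
def count_node_types_py (mermaid_code : String) : List (String × Int) :=
  [ ("attack", ((PySem.Chars.splitOn mermaid_code.toList ['\n']).filter
      (fun line => PySem.Chars.isIn "class ".toList line && PySem.Chars.isIn "attack".toList line)).length)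
  , ("goal", ((PySem.Chars.splitOn mermaid_code.toList ['\n']).filter
      (fun line => PySem.Chars.isIn "class ".toList line && PySem.Chars.isIn "goal".toList line)).length)
  , ("fact", ((PySem.Chars.splitOn mermaid_code.toList ['\n']).filter
      (fun line => PySem.Chars.isIn "class ".toList line && PySem.Chars.isIn "fact".toList line)).length)
  , ("mitigation", ((PySem.Chars.splitOn mermaid_code.toList ['\n']).filter
      (fun line => PySem.Chars.isIn "class ".toList line && PySem.Chars.isIn "mitigation".toList line)).length) ]

-- ===== PORT B =====
def count_node_types_py_alt (mermaid_code : String) : List (String × Int) :=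
  let st : Int × Int × Int × Int := (PySem.Chars.splitOn mermaid_code.toList ['\n']).foldl
    (fun (acc : Int × Int × Int × Int) line =>
      if PySem.Chars.isIn "class ".toList line then
        ( acc.1 + (if PySem.Chars.isIn "attack".toList line then 1 else 0)
        , acc.2.1 + (if PySem.Chars.isIn "goal".toList line then 1 else 0)
        , acc.2.2.1 + (if PySem.Chars.isIn "fact".toList line then 1 else 0)
        , acc.2.2.2 + (if PySem.Chars.isIn "mitigation".toList line then 1 else 0) )
      else acc)
    (0, 0, 0, 0)
  [("attack", st.1), ("goal", st.2.1), ("fact", st.2.2.1), ("mitigation", st.2.2.2)]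

-- ===== PRECONDITION & SPEC =====
def Spec_count_node_types_py (mermaid_code : String) (out : List (String × Int)) : Prop := out = count_node_types_py_alt mermaid_code
instance (mermaid_code : String) (out : List (String × Int)) : Decidable (Spec_count_node_types_py mermaid_code out) := by unfold Spec_count_node_types_py; infer_instance

-- ===== CLAIM (what is proved, stated in full; the proofs are below) =====
def Claim_equal_count_node_types_py : Prop := ∀ (mermaid_code : String), Dom_count_node_types_py mermaid_code → Spec_count_node_types_py mermaid_code (count_node_types_py mermaid_code)

-- ===== LEMMAS AND PROOFS =====

theorem pv_fold_counts {α : Type} (p q1 q2 q3 q4 : α → Bool) (lines : List α) (a g f m : Int) :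
    lines.foldl
      (fun (acc : Int × Int × Int × Int) line =>
        if p line then
          ( acc.1 + (if q1 line then 1 else 0)
          , acc.2.1 + (if q2 line then 1 else 0)
          , acc.2.2.1 + (if q3 line then 1 else 0)
          , acc.2.2.2 + (if q4 line then 1 else 0) )
        else acc)
      (a, g, f, m)
    = ( a + ((lines.filter (fun l => p l && q1 l)).length : Int)
      , g + ((lines.filter (fun l => p l && q2 l)).length : Int)
      , f + ((lines.filter (fun l => p l && q3 l)).length : Int)
      , m + ((lines.filter (fun l => p l && q4 l)).length : Int) ) := by
  induction lines generalizing a g f m with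
  | nil => simp
  | cons x xs ih =>
    simp only [List.foldl_cons, List.filter_cons]
    by_cases hc : p x = true
    · rw [if_pos hc, ih]
      simp only [hc, Bool.true_and]
      by_cases h1 : q1 x <;> by_cases h2 : q2 x <;> by_cases h3 : q3 x <;> by_cases h4 : q4 x <;>
        simp [h1, h2, h3, h4, Prod.ext_iff] <;> omega
    · simp only [Bool.not_eq_true] at hc
      rw [if_neg (by simp [hc]), ih]
      simp [hc]

-- ===== VERDICT (by name: the statement is the Claim_ definition above) =====
theorem count_node_types_py_spec : Claim_equal_count_node_types_py := by
  intro s _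
  unfold Spec_count_node_types_py count_node_types_py count_node_types_py_alt
  rw [pv_fold_counts]
  norm_num
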